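-- pv_equiv track=rewrite | github.com/UriNeri/rolypoly | src/rolypoly/utils/bio/dotplot.py | compute_self_dotplot_track_spans
-- ===== SOURCE A (Python) =====
-- def compute_self_dotplot_track_spans(
--     sequence: str,
--     k: int,
-- ) -> dict[str, int]:
--     """Estimate strongest forward/inverted self-dotplot tracks from exact k-mer runs."""
--     normalized = str(sequence).upper()
--     n = len(normalized)
--     if n < max(2, k):
--         return {
--             "dotplot_forward_max_span": 0,
--             "dotplot_inverted_max_span": 0,
--         }
--
--     kmer_positions: dict[str, list[int]] = {}
--     for start in range(0, n - k + 1):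
--         kmer = normalized[start : start + k]
--         kmer_positions.setdefault(kmer, []).append(start)
--
--     def max_span_from_offset_positions(
--         offset_positions: dict[int, list[int]],
--     ) -> int:
--         max_span = 0
--         for positions in offset_positions.values():
--             if not positions:
--                 continue
--             unique_positions = sorted(set(positions))
--             run_start = unique_positions[0]
--             run_prev = unique_positions[0]
--             for pos in unique_positions[1:]:
--                 if pos == run_prev + 1:
--                     run_prev = pos
--                     continue
--                 run_len = (run_prev - run_start) + 1
--                 max_span = max(max_span, run_len + k - 1)
--                 run_start = pos
--                 run_prev = pos
--             run_len = (run_prev - run_start) + 1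
--             max_span = max(max_span, run_len + k - 1)
--         return max_span
--
--     offset_to_positions_forward: dict[int, list[int]] = {}
--     for positions in kmer_positions.values():
--         if len(positions) < 2:
--             continue
--         for left_idx in range(0, len(positions) - 1):
--             left_pos = positions[left_idx]
--             for right_pos in positions[left_idx + 1 :]:
--                 offset = right_pos - left_pos
--                 if offset <= 0:
--                     continue
--                 offset_to_positions_forward.setdefault(offset, []).append(
--                     left_pos
--                 )
--     forward_max_span = max_span_from_offset_positions(offset_to_positions_forward)
--
--     rc_sequence = normalized[::-1].translate(str.maketrans("ACGT", "TGCA"))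
--     rc_kmer_positions: dict[str, list[int]] = {}
--     for start in range(0, n - k + 1):
--         kmer = rc_sequence[start : start + k]
--         rc_kmer_positions.setdefault(kmer, []).append(start)
--
--     offset_to_positions_inverted: dict[int, list[int]] = {}
--     for kmer, query_positions in kmer_positions.items():
--         target_positions = rc_kmer_positions.get(kmer)
--         if not target_positions:
--             continue
--         for query_pos in query_positions:
--             for target_pos in target_positions:
--                 delta = target_pos - query_pos
--                 offset_to_positions_inverted.setdefault(delta, []).append(
--                     query_pos
--                 )
--     inverted_max_span = max_span_from_offset_positions(offset_to_positions_inverted)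
--
--     return {
--         "dotplot_forward_max_span": int(forward_max_span),
--         "dotplot_inverted_max_span": int(inverted_max_span),
--     }
-- ===== SOURCE B (Python) =====
-- def compute_self_dotplot_track_spans(
--     sequence: str,
--     k: int,
-- ) -> dict[str, int]:
--     """Diagonal-scan re-implementation: for each offset, stream the longest run of
--     matching k-mers directly, with no k-mer index, pair enumeration or sorting."""
--     s = str(sequence).upper()
--     n = len(s)
--     if n < max(2, k):
--         return {
--             "dotplot_forward_max_span": 0,
--             "dotplot_inverted_max_span": 0,
--         }
--     m = n - k  # last valid k-mer start
--
--     def best_span(pred, lo, hi):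
--         best = 0
--         cur = 0
--         for p in range(lo, hi + 1):
--             if pred(p):
--                 cur += 1
--                 if cur > best:
--                     best = cur
--             else:
--                 cur = 0
--         return best + k - 1 if best > 0 else 0
--
--     forward = 0
--     for d in range(1, m + 1):
--         span = best_span(lambda p: s[p:p + k] == s[p + d:p + d + k], 0, m - d)
--         if span > forward:
--             forward = span
--
--     rc = s[::-1].translate(str.maketrans("ACGT", "TGCA"))
--     inverted = 0
--     for delta in range(-m, m + 1):
--         span = best_span(
--             lambda p: 0 <= p + delta <= m and s[p:p + k] == rc[p + delta:p + delta + k],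
--             0, m)
--         if span > inverted:
--             inverted = span
--
--     return {
--         "dotplot_forward_max_span": int(forward),
--         "dotplot_inverted_max_span": int(inverted),
--     }
-- ===== Notes on version B (the rewrite author's own statement) =====
-- stated objective: alternative
-- what changed: B replaces A's pipeline (k-mer hash index, pairwise enumeration into an offset dictionary, then per-offset set/sort/run-merge) by a direct per-diagonal streaming scan that counts the longest run of consecutive matching k-mers for each offset, with no dictionaries, sorting or pair enumeration.
import Mathlib
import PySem

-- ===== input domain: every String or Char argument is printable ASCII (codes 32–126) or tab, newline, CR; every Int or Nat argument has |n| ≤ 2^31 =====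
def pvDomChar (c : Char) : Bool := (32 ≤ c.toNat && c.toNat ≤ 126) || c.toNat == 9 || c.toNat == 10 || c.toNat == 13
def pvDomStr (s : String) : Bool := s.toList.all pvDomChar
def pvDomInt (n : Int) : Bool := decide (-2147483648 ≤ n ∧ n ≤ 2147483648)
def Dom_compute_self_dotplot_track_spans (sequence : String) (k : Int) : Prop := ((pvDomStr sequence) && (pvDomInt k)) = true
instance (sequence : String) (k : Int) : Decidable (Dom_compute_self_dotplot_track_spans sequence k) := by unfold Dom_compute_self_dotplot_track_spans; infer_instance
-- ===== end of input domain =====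

-- B re-implements the same forward/inverted self-dotplot spans by streaming, for each
-- diagonal offset, the longest run of matching k-mers directly — no k-mer index, no pair
-- enumeration into an offset dict, no set/sort/run-merging (objective: alternative).

-- ===== PORT A =====

-- normalized[start:start+k]  (the k-mer at `start`; shared sub-expression of both Pythons)
def pvKmer (N : List Char) (k p : Int) : List Char :=
  PySem.List.slice N (some p) (some (p + k))

-- str.translate(str.maketrans("ACGT", "TGCA")) is per-character; exact for this 4-char table
def pvComp (c : Char) : Char :=
  if c = 'A' then 'T' else if c = 'C' then 'G' else if c = 'G' then 'C' else if c = 'T' then 'A' else c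

-- the run-merge scan of max_span_from_offset_positions: state (run_start, run_prev, max_span)
def pvGscanA (k : Int) (t : List Int) (st : Int × Int × Int) : Int :=
  let f := t.foldl (fun (s : Int × Int × Int) pos =>
    if pos = s.2.1 + 1 then (s.1, pos, s.2.2)
    else (pos, pos, max s.2.2 ((s.2.1 - s.1 + 1) + k - 1))) st
  max f.2.2 ((f.2.1 - f.1 + 1) + k - 1)

def pvMaxSpanFromOffsets (k : Int) (od : PySem.Dict Int (List Int)) : Int :=
  od.values.foldl (fun max_span positions =>
    if positions = [] then max_span
    else
      match PySem.List.sorted (PySem.Set.ofList positions) (fun x => x) with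
      | [] => max_span   -- unreachable: positions ≠ [] so its sorted set is nonempty
      | h :: t => pvGscanA k t (h, h, max_span)) 0

-- kmer_positions / rc_kmer_positions builder (the same loop appears twice in the Python)
def pvKmerDict (N : List Char) (k n : Int) : PySem.Dict (List Char) (List Int) :=
  (PySem.List.pyRange 0 (n - k + 1)).foldl
    (fun d start => d.modify (pvKmer N k start) [] (· ++ [start]))
    PySem.Dict.empty

def pvForwardOffsets (kp : PySem.Dict (List Char) (List Int)) : PySem.Dict Int (List Int) :=
  kp.values.foldl (fun od positions =>
    if PySem.List.len positions < 2 then od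
    else (PySem.List.pyRange 0 (PySem.List.len positions - 1)).foldl (fun od li =>
      (PySem.List.slice positions (some (li + 1)) none).foldl (fun od rp =>
        if rp - PySem.List.pyGetD positions li 0 ≤ 0 then od
        else od.modify (rp - PySem.List.pyGetD positions li 0) [] (· ++ [PySem.List.pyGetD positions li 0])) od) od)
    PySem.Dict.empty

def pvInvertedOffsets (kp rkp : PySem.Dict (List Char) (List Int)) : PySem.Dict Int (List Int) :=
  kp.items.foldl (fun od kv =>
    match rkp.get? kv.1 with
    | none => od
    | some tps =>
      if tps = [] then od
      else kv.2.foldl (fun od qp =>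
        tps.foldl (fun od tp => od.modify (tp - qp) [] (· ++ [qp])) od) od)
    PySem.Dict.empty

def compute_self_dotplot_track_spans (sequence : String) (k : Int) : List (String × Int) :=
  let N := PySem.Chars.upper sequence.toList
  let n : Int := PySem.List.len N
  if n < max 2 k then
    [("dotplot_forward_max_span", 0), ("dotplot_inverted_max_span", 0)]
  else
    let kp := pvKmerDict N k n
    let forward_max := pvMaxSpanFromOffsets k (pvForwardOffsets kp)
    let rcN := N.reverse.map pvComp   -- normalized[::-1].translate(...): reverse, then translate
    let rkp := pvKmerDict rcN k n
    let inverted_max := pvMaxSpanFromOffsets k (pvInvertedOffsets kp rkp)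
    [("dotplot_forward_max_span", forward_max), ("dotplot_inverted_max_span", inverted_max)]

-- ===== PORT B =====

-- longest run of consecutive p in [lo, hi] with pred p, as a span (best + k - 1, or 0)
def pvBestSpan (k : Int) (pred : Int → Bool) (lo hi : Int) : Int :=
  let st := (PySem.List.pyRange lo (hi + 1)).foldl
    (fun (s : Int × Int) p =>
      if pred p then (if s.2 + 1 > s.1 then s.2 + 1 else s.1, s.2 + 1) else (s.1, 0))
    (0, 0)
  if st.1 > 0 then st.1 + k - 1 else 0

def compute_self_dotplot_track_spans_alt (sequence : String) (k : Int) : List (String × Int) :=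
  let N := PySem.Chars.upper sequence.toList
  let n : Int := PySem.List.len N
  if n < max 2 k then
    [("dotplot_forward_max_span", 0), ("dotplot_inverted_max_span", 0)]
  else
    let m := n - k
    let forward := (PySem.List.pyRange 1 (m + 1)).foldl (fun forward d =>
      let span := pvBestSpan k (fun p => pvKmer N k p == pvKmer N k (p + d)) 0 (m - d)
      if span > forward then span else forward) 0
    let rcN := N.reverse.map pvComp
    let inverted := (PySem.List.pyRange (-m) (m + 1)).foldl (fun inverted delta =>
      let span := pvBestSpan k
        (fun p => decide (0 ≤ p + delta) && decide (p + delta ≤ m) && (pvKmer N k p == pvKmer rcN k (p + delta))) 0 m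
      if span > inverted then span else inverted) 0
    [("dotplot_forward_max_span", forward), ("dotplot_inverted_max_span", inverted)]

-- ===== PRECONDITION & SPEC =====
def Spec_compute_self_dotplot_track_spans (sequence : String) (k : Int) (out : List (String × Int)) : Prop :=
  out = compute_self_dotplot_track_spans_alt sequence k
instance (sequence : String) (k : Int) (out : List (String × Int)) : Decidable (Spec_compute_self_dotplot_track_spans sequence k out) := by
  unfold Spec_compute_self_dotplot_track_spans; infer_instance

-- ===== CLAIM (what is proved, stated in full; the proofs are below) =====
def Claim_equal_compute_self_dotplot_track_spans : Prop := ∀ (sequence : String) (k : Int), Dom_compute_self_dotplot_track_spans sequence k → Spec_compute_self_dotplot_track_spans sequence k (compute_self_dotplot_track_spans sequence k)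

-- ===== LEMMAS AND PROOFS =====
def pvGstep : (Int × Int × Int) → Int → (Int × Int × Int) := fun s pos =>
  if pos = s.2.1 + 1 then (s.1, pos, s.2.2) else (pos, pos, max s.2.2 (s.2.1 - s.1 + 1))

def pvGpure (t : List Int) (st : Int × Int × Int) : Int :=
  let f := t.foldl pvGstep st
  max f.2.2 (f.2.1 - f.1 + 1)

lemma pvGpure_nil (s p ms : Int) : pvGpure [] (s, p, ms) = max ms (p - s + 1) := rfl

lemma pvGpure_cons (x : Int) (t : List Int) (s p ms : Int) :
    pvGpure (x :: t) (s, p, ms) =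
      if x = p + 1 then pvGpure t (s, x, ms) else pvGpure t (x, x, max ms (p - s + 1)) := by
  simp only [pvGpure, List.foldl_cons, pvGstep]
  split_ifs <;> rfl

lemma pvGpure_max (t : List Int) : ∀ s p a b : Int,
    pvGpure t (s, p, max a b) = max a (pvGpure t (s, p, b)) := by
  induction t with
  | nil => intro s p a b; simp only [pvGpure_nil]; omega
  | cons x t ih =>
    intro s p a b
    rw [pvGpure_cons, pvGpure_cons]
    split_ifs with hx
    · exact ih s x a b
    · rw [show max (max a b) (p - s + 1) = max a (max b (p - s + 1)) by omega]
      exact ih x x a (max b (p - s + 1))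

lemma pvGpure_ge_one (t : List Int) : ∀ s p : Int, s ≤ p → 1 ≤ pvGpure t (s, p, 0) := by
  induction t with
  | nil => intro s p h; simp only [pvGpure_nil]; omega
  | cons x t ih =>
    intro s p h
    rw [pvGpure_cons]
    split_ifs with hx
    · exact ih s x (by omega)
    · rw [show max (0:Int) (p - s + 1) = max (max 0 (p-s+1)) 0 by omega, pvGpure_max]
      have := ih x x le_rfl
      omega

lemma pvGscanA_shift (k : Int) (t : List Int) : ∀ s p ms : Int, s ≤ p →
    pvGscanA k t (s, p, ms) = max ms (pvGpure t (s, p, 0) + (k - 1)) := by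
  induction t with
  | nil => intro s p ms h; simp only [pvGscanA, List.foldl_nil, pvGpure_nil]; omega
  | cons x t ih =>
    intro s p ms h
    rw [pvGpure_cons]
    have hstep : pvGscanA k (x :: t) (s, p, ms) =
        if x = p + 1 then pvGscanA k t (s, x, ms)
        else pvGscanA k t (x, x, max ms ((p - s + 1) + k - 1)) := by
      simp only [pvGscanA, List.foldl_cons]
      split_ifs <;> rfl
    rw [hstep]
    split_ifs with hx
    · exact ih s x ms (by omega)
    · rw [ih x x _ le_rfl,
        show max (0:Int) (p - s + 1) = max (p - s + 1) 0 by omega, pvGpure_max]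
      have := pvGpure_ge_one t x x le_rfl
      omega
def pvBstep (pred : Int → Bool) : (Int × Int) → Int → (Int × Int) := fun s p =>
  if pred p then (if s.2 + 1 > s.1 then s.2 + 1 else s.1, s.2 + 1) else (s.1, 0)


lemma pvGpure_eq (t : List Int) (st : Int × Int × Int) :
    pvGpure t st = max (t.foldl pvGstep st).2.2 ((t.foldl pvGstep st).2.1 - (t.foldl pvGstep st).1 + 1) := rfl

lemma pvStream (pred : Int → Bool) (a : Int) : ∀ b : Int, a ≤ b →
    (((PySem.List.pyRange a b).filter pred = []) →
        (PySem.List.pyRange a b).foldl (pvBstep pred) (0, 0) = (0, 0)) ∧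
    (∀ hd t, (PySem.List.pyRange a b).filter pred = hd :: t →
        ((PySem.List.pyRange a b).foldl (pvBstep pred) (0, 0)).1 = pvGpure t (hd, hd, 0) ∧
        (t.foldl pvGstep (hd, hd, 0)).1 ≤ (t.foldl pvGstep (hd, hd, 0)).2.1 ∧
        pred (t.foldl pvGstep (hd, hd, 0)).2.1 = true ∧
        (t.foldl pvGstep (hd, hd, 0)).2.1 ≤ b - 1 ∧
        ((PySem.List.pyRange a b).foldl (pvBstep pred) (0, 0)).2 =
          (if pred (b - 1) then (t.foldl pvGstep (hd, hd, 0)).2.1 - (t.foldl pvGstep (hd, hd, 0)).1 + 1 else 0) ∧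
        (pred (b - 1) = true → (t.foldl pvGstep (hd, hd, 0)).2.1 = b - 1)) := by
  intro b hb
  induction b, hb using Int.le_induction with
  | base =>
    rw [PySem.List.pyRange_one_eq_nil le_rfl]
    exact ⟨fun _ => rfl, fun hd t ht => by simp at ht⟩
  | succ b hb IH =>
    obtain ⟨IH0, IH1⟩ := IH
    rw [PySem.List.pyRange_one_succ_right hb, List.filter_append, List.foldl_append,
      List.filter_cons, List.filter_nil]
    by_cases hq : pred b
    · simp only [hq, if_true]
      rcases hu : (PySem.List.pyRange a b).filter pred with _ | ⟨hd, t⟩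
      · -- no earlier match: the new filtered list is [b]
        have h00 := IH0 hu
        refine ⟨fun habs => by simp at habs, ?_⟩
        intro hd' t' ht'
        rw [List.nil_append] at ht'
        injection ht' with e1 e2
        subst e1; subst e2
        rw [h00]
        rw [List.foldl_cons, List.foldl_nil]
        have hbs : pvBstep pred (0, 0) b = (1, 1) := by simp [pvBstep, hq]
        rw [hbs]
        refine ⟨by rw [pvGpure_eq]; dsimp only [List.foldl_nil]; omega, le_rfl, hq,
          by dsimp only [List.foldl_nil]; omega, ?_,
          fun _ => by dsimp only [List.foldl_nil]; omega⟩
        rw [show b + 1 - 1 = b by omega, if_pos hq]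
        dsimp only [List.foldl_nil]
        omega
      · obtain ⟨hbest, hsp, hpredp, hple, hcur, hlast⟩ := IH1 hd t hu
        refine ⟨fun habs => by simp at habs, ?_⟩
        intro hd' t' ht'
        rw [List.cons_append] at ht'
        injection ht' with e1 e2
        subst e1; subst e2
        rw [pvGpure_eq] at hbest
        rcases hfe : t.foldl pvGstep (hd, hd, 0) with ⟨fs, fp, fms⟩
        rw [hfe] at hbest hsp hpredp hple hcur hlast
        rcases hse : (PySem.List.pyRange a b).foldl (pvBstep pred) (0, 0) with ⟨b1, c1⟩
        rw [hse] at hbest hcur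
        dsimp only at hbest hsp hpredp hple hcur hlast
        have hbs : pvBstep pred (b1, c1) b = (if c1 + 1 > b1 then c1 + 1 else b1, c1 + 1) := by
          simp [pvBstep, hq]
        rw [List.foldl_cons, List.foldl_nil, hbs, pvGpure_eq, List.foldl_append, hfe]
        by_cases hprev : pred (b - 1)
        · have hpb : fp = b - 1 := hlast hprev
          rw [if_pos hprev] at hcur
          have hstep : pvGstep (fs, fp, fms) b = (fs, b, fms) := by
            simp [pvGstep, show b = fp + 1 by omega]
          rw [List.foldl_cons, List.foldl_nil, hstep]
          refine ⟨by dsimp only; omega, by dsimp only; omega, by dsimp only; exact hq,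
            by dsimp only; omega, ?_, fun _ => by dsimp only; omega⟩
          rw [show b + 1 - 1 = b by omega, if_pos hq]
          dsimp only
          omega
        · rw [if_neg hprev] at hcur
          have hne : ¬ b = fp + 1 := fun habs => hprev (by rw [show b - 1 = fp by omega]; exact hpredp)
          have hstep : pvGstep (fs, fp, fms) b = (b, b, max fms (fp - fs + 1)) := by
            simp [pvGstep, hne]
          rw [List.foldl_cons, List.foldl_nil, hstep]
          refine ⟨by dsimp only; omega, by dsimp only; omega, by dsimp only; exact hq,
            by dsimp only; omega, ?_, fun _ => by dsimp only; omega⟩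
          rw [show b + 1 - 1 = b by omega, if_pos hq]
          dsimp only
          omega
    · simp only [hq, if_false, Bool.false_eq_true, List.append_nil]
      rcases hu : (PySem.List.pyRange a b).filter pred with _ | ⟨hd, t⟩
      · have h00 := IH0 hu
        refine ⟨fun _ => ?_, fun hd' t' ht' => by simp at ht'⟩
        rw [List.foldl_cons, List.foldl_nil, h00]
        simp [pvBstep, hq]
      · obtain ⟨hbest, hsp, hpredp, hple, hcur, hlast⟩ := IH1 hd t hu
        refine ⟨fun habs => by simp at habs, ?_⟩
        intro hd' t' ht'
        injection ht' with e1 e2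
        subst e1; subst e2
        rcases hse : (PySem.List.pyRange a b).foldl (pvBstep pred) (0, 0) with ⟨b1, c1⟩
        rw [hse] at hbest hcur
        have hbs : pvBstep pred (b1, c1) b = (b1, 0) := by simp [pvBstep, hq]
        rw [List.foldl_cons, List.foldl_nil, hbs]
        refine ⟨hbest, hsp, hpredp, by omega, ?_, ?_⟩
        · rw [show b + 1 - 1 = b by omega, if_neg (by simp [hq])]
        · intro habs
          rw [show b + 1 - 1 = b by omega] at habs
          rw [habs] at hq; exact absurd rfl hq

lemma pvBestSpan_eq_foldl (k : Int) (pred : Int → Bool) (lo hi : Int) :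
    pvBestSpan k pred lo hi =
      (if ((PySem.List.pyRange lo (hi + 1)).foldl (pvBstep pred) (0, 0)).1 > 0
       then ((PySem.List.pyRange lo (hi + 1)).foldl (pvBstep pred) (0, 0)).1 + k - 1 else 0) := rfl

-- max-fold helpers
lemma pv_init_le_foldlmax {γ : Type} (l : List γ) (g : γ → Int) : ∀ a : Int,
    a ≤ l.foldl (fun acc x => max acc (g x)) a := by
  induction l with
  | nil => intro a; simp
  | cons x l ih => intro a; exact le_trans (le_max_left a (g x)) (ih (max a (g x)))

lemma pv_le_foldlmax {γ : Type} (l : List γ) (g : γ → Int) : ∀ a : Int, ∀ x ∈ l,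
    g x ≤ l.foldl (fun acc y => max acc (g y)) a := by
  induction l with
  | nil => intro a x hx; simp at hx
  | cons y l ih =>
    intro a x hx
    rcases List.mem_cons.1 hx with rfl | hx
    · exact le_trans (le_max_right a (g x)) (pv_init_le_foldlmax l g _)
    · exact ih _ x hx

lemma pv_foldlmax_le {γ : Type} (l : List γ) (g : γ → Int) (c : Int) : ∀ a : Int, a ≤ c →
    (∀ x ∈ l, g x ≤ c) → l.foldl (fun acc x => max acc (g x)) a ≤ c := by
  induction l with
  | nil => intro a ha _; simpa using ha
  | cons x l ih =>
    intro a ha h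
    exact ih _ (max_le ha (h x List.mem_cons_self)) (fun y hy => h y (List.mem_cons_of_mem _ hy))

lemma pv_two_le_length {l : List Int} {a b : Int} (ha : a ∈ l) (hb : b ∈ l) (hne : a ≠ b) :
    1 < l.length := by
  match l with
  | [] => simp at ha
  | [x] =>
    rw [List.mem_singleton] at ha hb
    exact absurd (ha.trans hb.symm) hne
  | x :: y :: t => simp only [List.length_cons]; omega

-- the sorted unique positions of v are exactly the matching positions, in range order
lemma pv_sortedSet_eq_filter (pred : Int → Bool) (lo b : Int) (v : List Int)
    (hv : ∀ x, x ∈ v ↔ x ∈ PySem.List.pyRange lo b ∧ pred x = true) :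
    PySem.List.sorted (PySem.Set.ofList v) (fun x => x) = (PySem.List.pyRange lo b).filter pred := by
  apply PySem.List.sorted_eq_of_perm_of_pairwise_lt
  · rw [List.perm_ext_iff_of_nodup (List.Nodup.filter _ (PySem.List.nodup_pyRange_one lo b))
      (PySem.Set.nodup_ofList v)]
    intro x
    rw [List.mem_filter, PySem.Set.mem_ofList, hv]
  · exact List.Pairwise.filter _ (PySem.List.pairwise_lt_pyRange_one lo b)

-- A's per-value body equals acc ⊔ B's per-diagonal best span (nonempty value)
lemma pv_bodyA_eq (k : Int) (pred : Int → Bool) (lo hi : Int) (v : List Int)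
    (hv : ∀ x, x ∈ v ↔ x ∈ PySem.List.pyRange lo (hi + 1) ∧ pred x = true)
    (hne : v ≠ []) (acc : Int) :
    (match PySem.List.sorted (PySem.Set.ofList v) (fun x => x) with
      | [] => acc
      | h :: t => pvGscanA k t (h, h, acc)) = max acc (pvBestSpan k pred lo hi) := by
  rw [pv_sortedSet_eq_filter pred lo (hi + 1) v hv]
  rcases hne' : List.filter pred (PySem.List.pyRange lo (hi + 1)) with _ | ⟨hd, t⟩
  · rcases List.exists_mem_of_ne_nil v hne with ⟨x, hx⟩
    rw [hv] at hx
    have : x ∈ List.filter pred (PySem.List.pyRange lo (hi + 1)) := List.mem_filter.2 hx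
    rw [hne'] at this
    simp at this
  · have hlohi : lo ≤ hi + 1 := by
      by_contra hcon
      rw [PySem.List.pyRange_one_eq_nil (by omega), List.filter_nil] at hne'
      exact absurd hne' (by simp)
    obtain ⟨_, hS⟩ := pvStream pred lo (hi + 1) hlohi
    obtain ⟨hbest, _, _, _, _, _⟩ := hS hd t hne'
    have hpos : 1 ≤ pvGpure t (hd, hd, 0) := pvGpure_ge_one t hd hd le_rfl
    rw [pvBestSpan_eq_foldl, hbest, if_pos (by omega)]
    simp only []
    rw [pvGscanA_shift k t hd hd acc le_rfl]
    omega

-- dict-of-diagonals max-span = per-diagonal streamed max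
lemma pvMaxEqCore (k : Int) (od : PySem.Dict Int (List Int)) (ran : List Int)
    (lo hi : Int → Int) (pr : Int → Int → Bool)
    (H1 : ∀ d ∈ ran, ∀ x, x ∈ od.getD d [] ↔ (x ∈ PySem.List.pyRange (lo d) (hi d + 1) ∧ pr d x = true))
    (H2 : ∀ d, d ∈ od.keys ↔ ∃ x, x ∈ od.getD d [])
    (H3 : od.keys.Nodup)
    (H4 : ∀ d ∈ od.keys, d ∈ ran) :
    pvMaxSpanFromOffsets k od
    = ran.foldl (fun acc d => max acc (pvBestSpan k (pr d) (lo d) (hi d))) 0 := by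
  unfold pvMaxSpanFromOffsets
  rw [PySem.Dict.values_eq_map_keys od H3 [], List.foldl_map]
  have hkeys : List.foldl (fun acc d =>
      if od.getD d [] = [] then acc
      else
        match PySem.List.sorted (PySem.Set.ofList (od.getD d [])) (fun x => x) with
        | [] => acc
        | h :: t => pvGscanA k t (h, h, acc)) 0 od.keys
      = List.foldl (fun acc d => max acc (pvBestSpan k (pr d) (lo d) (hi d))) 0 od.keys := by
    apply PySem.List.foldl_congr_mem
    intro acc d hd
    have hdr := H4 d hd
    have hne : od.getD d [] ≠ [] := by
      rcases (H2 d).1 hd with ⟨x, hx⟩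
      exact List.ne_nil_of_mem hx
    rw [if_neg hne]
    exact pv_bodyA_eq k (pr d) (lo d) (hi d) _ (H1 d hdr) hne acc
  rw [hkeys]
  apply le_antisymm
  · apply pv_foldlmax_le _ _ _ 0 (pv_init_le_foldlmax _ _ 0)
    intro d hd
    exact pv_le_foldlmax _ _ 0 d (H4 d hd)
  · apply pv_foldlmax_le _ _ _ 0 (pv_init_le_foldlmax _ _ 0)
    intro d hd
    by_cases hk' : d ∈ od.keys
    · exact pv_le_foldlmax _ _ 0 d hk'
    · have hempty : od.getD d [] = [] := by
        rcases hgd : od.getD d [] with _ | ⟨x, t⟩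
        · rfl
        · exact absurd ((H2 d).2 ⟨x, by rw [hgd]; exact List.mem_cons_self⟩) hk'
      have hfil : (PySem.List.pyRange (lo d) (hi d + 1)).filter (pr d) = [] := by
        rw [List.filter_eq_nil_iff]
        intro x hx hpx
        have : x ∈ od.getD d [] := (H1 d hd x).2 ⟨hx, hpx⟩
        rw [hempty] at this; simp at this
      have h0 : pvBestSpan k (pr d) (lo d) (hi d) = 0 := by
        by_cases hlohi : lo d ≤ hi d + 1
        · obtain ⟨h00, _⟩ := pvStream (pr d) (lo d) (hi d + 1) hlohi
          rw [pvBestSpan_eq_foldl, h00 hfil]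
          norm_num
        · rw [pvBestSpan_eq_foldl, PySem.List.pyRange_one_eq_nil (by omega)]
          norm_num
      rw [h0]
      exact pv_init_le_foldlmax _ _ 0

-- "appender" predicate: F appends, per diagonal d, exactly the x with R d x to the dict
def PvApp (R : Int → Int → Prop) (F : PySem.Dict Int (List Int) → PySem.Dict Int (List Int)) : Prop :=
  ∀ od : PySem.Dict Int (List Int),
    (∀ d x, x ∈ (F od).getD d [] ↔ (x ∈ od.getD d [] ∨ R d x)) ∧
    (∀ d, d ∈ (F od).keys ↔ (d ∈ od.keys ∨ ∃ x, R d x)) ∧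
    (od.keys.Nodup → (F od).keys.Nodup)

lemma pvApp_modify (c v : Int) :
    PvApp (fun d x => d = c ∧ x = v) (fun od => od.modify c [] (· ++ [v])) := by
  intro od
  refine ⟨fun d x => ?_, fun d => ?_, fun h => ?_⟩
  · by_cases hdc : d = c
    · subst hdc
      rw [PySem.Dict.getD_modify_self od d [] (· ++ [v])]
      simp
    · rw [PySem.Dict.getD_modify_of_ne od [] (· ++ [v]) hdc]
      simp [hdc]
  · rw [PySem.Dict.keys_modify, PySem.Dict.mem_keys_insert]
    constructor
    · rintro (rfl | h)
      · exact Or.inr ⟨v, rfl, rfl⟩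
      · exact Or.inl h
    · rintro (h | ⟨x, rfl, rfl⟩)
      · exact Or.inr h
      · exact Or.inl rfl
  · rw [PySem.Dict.keys_modify] at *
    exact (List.Perm.nodup_iff (by rfl)).2 (PySem.Dict.nodup_keys_insert od c _ h)

lemma pvApp_guard (cond : Prop) [Decidable cond] (R : Int → Int → Prop)
    (F : PySem.Dict Int (List Int) → PySem.Dict Int (List Int)) (h : PvApp R F) :
    PvApp (fun d x => ¬ cond ∧ R d x) (fun od => if cond then od else F od) := by
  intro od
  by_cases hc : cond
  · simp only [hc, if_true]
    exact ⟨fun d x => by simp, fun d => by simp, fun hn => hn⟩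
  · simp only [hc, if_false]
    obtain ⟨h1, h2, h3⟩ := h od
    exact ⟨fun d x => by rw [h1]; simp [hc], fun d => by rw [h2]; simp [hc], h3⟩

lemma pvApp_foldl {β : Type} (l : List β) (body : PySem.Dict Int (List Int) → β → PySem.Dict Int (List Int))
    (R : β → Int → Int → Prop) (h : ∀ e ∈ l, PvApp (R e) (fun od => body od e)) :
    PvApp (fun d x => ∃ e ∈ l, R e d x) (fun od => l.foldl body od) := by
  induction l with
  | nil =>
    intro od
    exact ⟨fun d x => by simp, fun d => by simp, fun hn => hn⟩
  | cons e l ih =>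
    intro od
    obtain ⟨h1, h2, h3⟩ := h e List.mem_cons_self od
    obtain ⟨g1, g2, g3⟩ := ih (fun e' he' => h e' (List.mem_cons_of_mem _ he')) (body od e)
    dsimp only at g1 g2 h1 h2 ⊢
    refine ⟨fun d x => ?_, fun d => ?_, fun hn => g3 (h3 hn)⟩
    · rw [List.foldl_cons, g1, h1]
      simp only [List.mem_cons]
      constructor
      · rintro ((hh | hh) | ⟨e', he', hh⟩)
        · exact Or.inl hh
        · exact Or.inr ⟨e, Or.inl rfl, hh⟩
        · exact Or.inr ⟨e', Or.inr he', hh⟩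
      · rintro (hh | ⟨e', (rfl | he'), hh⟩)
        · exact Or.inl (Or.inl hh)
        · exact Or.inl (Or.inr hh)
        · exact Or.inr ⟨e', he', hh⟩
    · rw [List.foldl_cons, g2, h2]
      simp only [List.mem_cons]
      constructor
      · rintro ((hh | ⟨x, hh⟩) | ⟨x, e', he', hh⟩)
        · exact Or.inl hh
        · exact Or.inr ⟨x, e, Or.inl rfl, hh⟩
        · exact Or.inr ⟨x, e', Or.inr he', hh⟩
      · rintro (hh | ⟨x, e', (rfl | he'), hh⟩)
        · exact Or.inl (Or.inl hh)
        · exact Or.inl (Or.inr ⟨x, hh⟩)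
        · exact Or.inr ⟨x, e', he', hh⟩


-- kmer dictionary characterization
lemma pvKmerDict_getD (N : List Char) (k n : Int) (w : List Char) :
    (pvKmerDict N k n).getD w [] =
      (PySem.List.pyRange 0 (n - k + 1)).filter (fun s => pvKmer N k s == w) := by
  unfold pvKmerDict
  have hmap : (PySem.List.pyRange 0 (n - k + 1)).foldl
      (fun d start => d.modify (pvKmer N k start) [] (· ++ [start])) PySem.Dict.empty
      = ((PySem.List.pyRange 0 (n - k + 1)).map (fun s => (pvKmer N k s, s))).foldl
          (fun d p => d.modify p.1 [] (· ++ [p.2])) PySem.Dict.empty := by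
    rw [List.foldl_map]
  rw [hmap, PySem.Dict.getD_foldl_modify_append, PySem.Dict.getD_empty, List.nil_append,
    List.filter_map, List.map_map]
  simp [Function.comp_def]

lemma pvKmerDict_keys (N : List Char) (k n : Int) :
    (pvKmerDict N k n).keys =
      PySem.Set.ofList ((PySem.List.pyRange 0 (n - k + 1)).map (pvKmer N k)) := by
  unfold pvKmerDict
  rw [PySem.Dict.keys_foldl_modify_key (PySem.List.pyRange 0 (n - k + 1))
    (fun s => pvKmer N k s) [] (fun _ s => (· ++ [s])) PySem.Dict.empty,
    PySem.Dict.keys_empty]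
  exact PySem.Set.update_empty _

lemma pvKmerDict_nodup_keys (N : List Char) (k n : Int) : (pvKmerDict N k n).keys.Nodup := by
  unfold pvKmerDict
  exact PySem.Dict.nodup_keys_foldl_modify_key (PySem.List.pyRange 0 (n - k + 1))
    (fun s => pvKmer N k s) [] (fun _ s => (· ++ [s])) PySem.Dict.empty
    (by rw [PySem.Dict.keys_empty]; exact List.nodup_nil)

lemma pvKmerDict_mem_getD (N : List Char) (k n : Int) (w : List Char) (x : Int) :
    x ∈ (pvKmerDict N k n).getD w [] ↔ (0 ≤ x ∧ x < n - k + 1 ∧ pvKmer N k x = w) := by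
  rw [pvKmerDict_getD, List.mem_filter, PySem.List.mem_pyRange_one]
  simp [beq_iff_eq, and_assoc]

lemma pvKmerDict_mem_keys (N : List Char) (k n : Int) (w : List Char) :
    w ∈ (pvKmerDict N k n).keys ↔ ∃ s, 0 ≤ s ∧ s < n - k + 1 ∧ pvKmer N k s = w := by
  rw [pvKmerDict_keys, PySem.Set.mem_ofList, List.mem_map]
  constructor
  · rintro ⟨s, hs, rfl⟩
    rw [PySem.List.mem_pyRange_one] at hs
    exact ⟨s, hs.1, hs.2, rfl⟩
  · rintro ⟨s, h0, h1, rfl⟩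
    exact ⟨s, PySem.List.mem_pyRange_one.2 ⟨h0, h1⟩, rfl⟩

lemma pvKmerDict_getD_pairwise (N : List Char) (k n : Int) (w : List Char) :
    ((pvKmerDict N k n).getD w []).Pairwise (· < ·) := by
  rw [pvKmerDict_getD]
  exact List.Pairwise.filter _ (PySem.List.pairwise_lt_pyRange_one _ _)

-- the inner pair loops of the forward pass reach exactly the ordered pairs of an ascending list
lemma pv_pairs_mem (g : List Int) (hg : List.Pairwise (· < ·) g) (d x : Int) :
    (∃ li ∈ PySem.List.pyRange 0 (PySem.List.len g - 1),
      ∃ rp ∈ PySem.List.slice g (some (li + 1)) none,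
        ¬(rp - PySem.List.pyGetD g li 0 ≤ 0) ∧
          (d = rp - PySem.List.pyGetD g li 0 ∧ x = PySem.List.pyGetD g li 0))
    ↔ (x ∈ g ∧ x + d ∈ g ∧ 0 < d) := by
  constructor
  · rintro ⟨li, hli, rp, hrp, hpos, rfl, rfl⟩
    rw [PySem.List.mem_pyRange_one, PySem.List.len_eq] at hli
    have hlt : li < (g.length : Int) := by omega
    rw [PySem.List.pyGetD_eq_getElem g 0 hli.1 hlt] at hpos ⊢
    rw [PySem.List.slice_from g (by omega : (0:Int) ≤ li + 1)] at hrp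
    have hrpg : rp ∈ g := List.drop_subset _ _ hrp
    refine ⟨List.getElem_mem _, ?_, by omega⟩
    rw [show g[li.toNat] + (rp - g[li.toNat]) = rp by ring]
    exact hrpg
  · rintro ⟨hx, hxd, hd⟩
    obtain ⟨i, hi, hgi⟩ := List.getElem_of_mem hx
    obtain ⟨j, hj, hgj⟩ := List.getElem_of_mem hxd
    have hij : i < j := by
      rcases lt_trichotomy i j with h | h | h
      · exact h
      · exfalso; simp only [h] at hgi; rw [hgj] at hgi; omega
      · exfalso
        have := List.pairwise_iff_getElem.1 hg j i hj hi h
        rw [hgi, hgj] at this; omega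
    refine ⟨(i : Int), PySem.List.mem_pyRange_one.2 ⟨by positivity, ?_⟩, ?_⟩
    · rw [PySem.List.len_eq]; omega
    · have h0i : (0:Int) ≤ (i:Int) := by positivity
      have hilt : (i : Int) < (g.length : Int) := by omega
      have hlp : PySem.List.pyGetD g (i:Int) 0 = x := by
        rw [PySem.List.pyGetD_eq_getElem g 0 h0i hilt]
        simp only [Int.toNat_natCast]
        exact hgi
      rw [hlp]
      refine ⟨x + d, ?_, by omega, by ring, rfl⟩
      rw [PySem.List.slice_from g (by omega : (0:Int) ≤ (i:Int) + 1),
        show ((i:Int) + 1).toNat = i + 1 from by omega]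
      have hjlen : j - (i + 1) < (g.drop (i + 1)).length := by
        rw [List.length_drop]; omega
      have hde : (g.drop (i + 1))[j - (i + 1)] = g[j] := by
        rw [List.getElem_drop]
        congr 1; omega
      rw [← hgj, ← hde]
      exact List.getElem_mem _


lemma pvApp_iff (R R' : Int → Int → Prop) (F : PySem.Dict Int (List Int) → PySem.Dict Int (List Int))
    (h : PvApp R F) (hiff : ∀ d x, R d x ↔ R' d x) : PvApp R' F := by
  intro od
  obtain ⟨h1, h2, h3⟩ := h od
  refine ⟨fun d x => ?_, fun d => ?_, h3⟩
  · rw [h1, hiff]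
  · rw [h2]
    constructor
    · rintro (h | ⟨x, hx⟩)
      · exact Or.inl h
      · exact Or.inr ⟨x, (hiff d x).1 hx⟩
    · rintro (h | ⟨x, hx⟩)
      · exact Or.inl h
      · exact Or.inr ⟨x, (hiff d x).2 hx⟩

-- the forward-offset dictionary holds, per offset d, exactly the left ends of matching k-mer pairs
lemma pvForwardOffsets_spec (N : List Char) (k n : Int) :
    (∀ d x, x ∈ (pvForwardOffsets (pvKmerDict N k n)).getD d [] ↔
        (0 ≤ x ∧ x + d ≤ n - k ∧ 0 < d ∧ pvKmer N k x = pvKmer N k (x + d))) ∧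
    (∀ d, d ∈ (pvForwardOffsets (pvKmerDict N k n)).keys ↔
        ∃ x, 0 ≤ x ∧ x + d ≤ n - k ∧ 0 < d ∧ pvKmer N k x = pvKmer N k (x + d)) ∧
    (pvForwardOffsets (pvKmerDict N k n)).keys.Nodup := by
  have happ := pvApp_foldl (pvKmerDict N k n).values
    (fun od positions =>
      if PySem.List.len positions < 2 then od
      else (PySem.List.pyRange 0 (PySem.List.len positions - 1)).foldl (fun od li =>
        (PySem.List.slice positions (some (li + 1)) none).foldl (fun od rp =>
          if rp - PySem.List.pyGetD positions li 0 ≤ 0 then od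
          else od.modify (rp - PySem.List.pyGetD positions li 0) [] (· ++ [PySem.List.pyGetD positions li 0])) od) od)
    (fun positions d x => ¬(PySem.List.len positions < 2) ∧
      ∃ li ∈ PySem.List.pyRange 0 (PySem.List.len positions - 1),
        ∃ rp ∈ PySem.List.slice positions (some (li + 1)) none,
          ¬(rp - PySem.List.pyGetD positions li 0 ≤ 0) ∧
            (d = rp - PySem.List.pyGetD positions li 0 ∧ x = PySem.List.pyGetD positions li 0))
    (fun positions _ =>
      pvApp_guard (PySem.List.len positions < 2) _ _
        (pvApp_foldl (PySem.List.pyRange 0 (PySem.List.len positions - 1)) _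
          (fun li d x => ∃ rp ∈ PySem.List.slice positions (some (li + 1)) none,
            ¬(rp - PySem.List.pyGetD positions li 0 ≤ 0) ∧
              (d = rp - PySem.List.pyGetD positions li 0 ∧ x = PySem.List.pyGetD positions li 0))
          (fun li _ =>
            pvApp_foldl (PySem.List.slice positions (some (li + 1)) none) _
              (fun rp d x => ¬(rp - PySem.List.pyGetD positions li 0 ≤ 0) ∧
                (d = rp - PySem.List.pyGetD positions li 0 ∧ x = PySem.List.pyGetD positions li 0))
              (fun rp _ =>
                pvApp_guard (rp - PySem.List.pyGetD positions li 0 ≤ 0) _ _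
                  (pvApp_modify (rp - PySem.List.pyGetD positions li 0) (PySem.List.pyGetD positions li 0))))))
  obtain ⟨h1, h2, h3⟩ := happ PySem.Dict.empty
  have hRC : ∀ d x, (∃ positions ∈ (pvKmerDict N k n).values, ¬(PySem.List.len positions < 2) ∧
      ∃ li ∈ PySem.List.pyRange 0 (PySem.List.len positions - 1),
        ∃ rp ∈ PySem.List.slice positions (some (li + 1)) none,
          ¬(rp - PySem.List.pyGetD positions li 0 ≤ 0) ∧
            (d = rp - PySem.List.pyGetD positions li 0 ∧ x = PySem.List.pyGetD positions li 0))
      ↔ (0 ≤ x ∧ x + d ≤ n - k ∧ 0 < d ∧ pvKmer N k x = pvKmer N k (x + d)) := by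
    intro d x
    constructor
    · rintro ⟨pos, hposv, _, hpair⟩
      rw [PySem.Dict.values_eq_map_keys _ (pvKmerDict_nodup_keys N k n) []] at hposv
      obtain ⟨w, hw, rfl⟩ := List.mem_map.1 hposv
      obtain ⟨hx, hxd, hd⟩ := (pv_pairs_mem _ (pvKmerDict_getD_pairwise N k n w) d x).1 hpair
      rw [pvKmerDict_mem_getD] at hx hxd
      obtain ⟨hx0, hx1, hxw⟩ := hx
      obtain ⟨hy0, hy1, hyw⟩ := hxd
      exact ⟨hx0, by omega, hd, hxw.trans hyw.symm⟩
    · rintro ⟨h0, hxd, hd, hkm⟩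
      refine ⟨(pvKmerDict N k n).getD (pvKmer N k x) [], ?_, ?_, ?_⟩
      · rw [PySem.Dict.values_eq_map_keys _ (pvKmerDict_nodup_keys N k n) []]
        exact List.mem_map.2 ⟨pvKmer N k x,
          (pvKmerDict_mem_keys N k n _).2 ⟨x, h0, by omega, rfl⟩, rfl⟩
      · have hxm : x ∈ (pvKmerDict N k n).getD (pvKmer N k x) [] :=
          (pvKmerDict_mem_getD N k n _ x).2 ⟨h0, by omega, rfl⟩
        have hym : x + d ∈ (pvKmerDict N k n).getD (pvKmer N k x) [] :=
          (pvKmerDict_mem_getD N k n _ (x + d)).2 ⟨by omega, by omega, hkm.symm⟩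
        have := pv_two_le_length hxm hym (by omega)
        rw [PySem.List.len_eq]
        omega
      · exact (pv_pairs_mem _ (pvKmerDict_getD_pairwise N k n (pvKmer N k x)) d x).2
          ⟨(pvKmerDict_mem_getD N k n _ x).2 ⟨h0, by omega, rfl⟩,
           (pvKmerDict_mem_getD N k n _ (x + d)).2 ⟨by omega, by omega, hkm.symm⟩, hd⟩
  dsimp only at h1 h2
  refine ⟨fun d x => ?_, fun d => ?_, h3 (by rw [PySem.Dict.keys_empty]; exact List.nodup_nil)⟩
  · have := h1 d x
    rw [PySem.Dict.getD_empty] at this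
    unfold pvForwardOffsets
    rw [this, hRC]
    simp
  · have := h2 d
    rw [PySem.Dict.keys_empty] at this
    unfold pvForwardOffsets
    rw [this]
    simp only [List.not_mem_nil, false_or]
    constructor
    · rintro ⟨x, hx⟩; exact ⟨x, (hRC d x).1 hx⟩
    · rintro ⟨x, hx⟩; exact ⟨x, (hRC d x).2 hx⟩


-- the inverted-offset dictionary holds, per delta, exactly the query positions matching the
-- reverse complement k-mer at query + delta
lemma pvInvertedOffsets_spec (N rcN : List Char) (k n : Int) :
    (∀ d x, x ∈ (pvInvertedOffsets (pvKmerDict N k n) (pvKmerDict rcN k n)).getD d [] ↔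
        (0 ≤ x ∧ x < n - k + 1 ∧ 0 ≤ x + d ∧ x + d < n - k + 1 ∧
          pvKmer N k x = pvKmer rcN k (x + d))) ∧
    (∀ d, d ∈ (pvInvertedOffsets (pvKmerDict N k n) (pvKmerDict rcN k n)).keys ↔
        ∃ x, 0 ≤ x ∧ x < n - k + 1 ∧ 0 ≤ x + d ∧ x + d < n - k + 1 ∧
          pvKmer N k x = pvKmer rcN k (x + d)) ∧
    (pvInvertedOffsets (pvKmerDict N k n) (pvKmerDict rcN k n)).keys.Nodup := by
  have hitem : ∀ kv ∈ (pvKmerDict N k n).items,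
      PvApp (fun d x => ∃ tps, (pvKmerDict rcN k n).get? kv.1 = some tps ∧ ¬(tps = []) ∧
          ∃ qp ∈ kv.2, ∃ tp ∈ tps, (d = tp - qp ∧ x = qp))
        (fun od => match (pvKmerDict rcN k n).get? kv.1 with
          | none => od
          | some tps =>
            if tps = [] then od
            else kv.2.foldl (fun od qp =>
              tps.foldl (fun od tp => od.modify (tp - qp) [] (· ++ [qp])) od) od) := by
    intro kv _
    rcases hget : (pvKmerDict rcN k n).get? kv.1 with _ | tps
    · intro od
      refine ⟨fun d x => ?_, fun d => ?_, fun h => ?_⟩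
      · simp
      · simp
      · exact h
    · have happ := pvApp_guard (tps = []) _ _
        (pvApp_foldl kv.2
          (fun od qp => tps.foldl (fun od tp => od.modify (tp - qp) [] (· ++ [qp])) od)
          (fun qp d x => ∃ tp ∈ tps, (d = tp - qp ∧ x = qp))
          (fun qp _ =>
            pvApp_foldl tps (fun od tp => od.modify (tp - qp) [] (· ++ [qp]))
              (fun tp d x => d = tp - qp ∧ x = qp)
              (fun tp _ => pvApp_modify (tp - qp) qp)))
      have happ' := pvApp_iff _
        (fun d x => ∃ tps', (some tps : Option (List Int)) = some tps' ∧ ¬(tps' = []) ∧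
          ∃ qp ∈ kv.2, ∃ tp ∈ tps', (d = tp - qp ∧ x = qp)) _ happ
        (by
          intro d x
          constructor
          · rintro ⟨hne, qp, hqp, tp, htp, hdx⟩
            exact ⟨tps, rfl, hne, qp, hqp, tp, htp, hdx⟩
          · rintro ⟨tps', heq, hne, hrest⟩
            injection heq with heq
            subst heq
            exact ⟨hne, hrest⟩)
      intro od
      obtain ⟨g1, g2, g3⟩ := happ' od
      dsimp only at g1 g2 ⊢
      exact ⟨g1, g2, g3⟩
  have happ := pvApp_foldl (pvKmerDict N k n).items _ _ hitem
  obtain ⟨h1, h2, h3⟩ := happ PySem.Dict.empty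
  have hRC : ∀ d x, (∃ kv ∈ (pvKmerDict N k n).items,
      ∃ tps, (pvKmerDict rcN k n).get? kv.1 = some tps ∧ ¬(tps = []) ∧
        ∃ qp ∈ kv.2, ∃ tp ∈ tps, (d = tp - qp ∧ x = qp))
      ↔ (0 ≤ x ∧ x < n - k + 1 ∧ 0 ≤ x + d ∧ x + d < n - k + 1 ∧
          pvKmer N k x = pvKmer rcN k (x + d)) := by
    intro d x
    constructor
    · rintro ⟨kv, hkv, tps, hget, _, qp, hqp, tp, htp, rfl, rfl⟩
      rw [PySem.Dict.items_eq_map_keys _ (pvKmerDict_nodup_keys N k n) []] at hkv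
      obtain ⟨w, hw, rfl⟩ := List.mem_map.1 hkv
      have htps : (pvKmerDict rcN k n).getD w [] = tps :=
        PySem.Dict.getD_of_get?_eq_some _ [] hget
      rw [pvKmerDict_mem_getD] at hqp
      rw [← htps, pvKmerDict_mem_getD] at htp
      obtain ⟨hq0, hq1, hqw⟩ := hqp
      obtain ⟨ht0, ht1, htw⟩ := htp
      refine ⟨hq0, hq1, by omega, by omega, ?_⟩
      rw [show x + (tp - x) = tp by ring]
      exact hqw.trans htw.symm
    · rintro ⟨h0, h1, h2', h3', hkm⟩
      have hw : pvKmer N k x ∈ (pvKmerDict N k n).keys :=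
        (pvKmerDict_mem_keys N k n _).2 ⟨x, h0, h1, rfl⟩
      have hwr : pvKmer N k x ∈ (pvKmerDict rcN k n).keys :=
        (pvKmerDict_mem_keys rcN k n _).2 ⟨x + d, h2', h3', hkm.symm⟩
      refine ⟨(pvKmer N k x, (pvKmerDict N k n).getD (pvKmer N k x) []), ?_, ?_⟩
      · rw [PySem.Dict.items_eq_map_keys _ (pvKmerDict_nodup_keys N k n) []]
        exact List.mem_map.2 ⟨pvKmer N k x, hw, rfl⟩
      · dsimp only
        rcases hcase : (pvKmerDict rcN k n).get? (pvKmer N k x) with _ | tps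
        · exact absurd ((PySem.Dict.get?_eq_none_iff_not_mem_keys _ _).1 hcase) (by simp [hwr])
        · have htps : (pvKmerDict rcN k n).getD (pvKmer N k x) [] = tps :=
            PySem.Dict.getD_of_get?_eq_some _ [] hcase
          have htpm : x + d ∈ tps := by
            rw [← htps, pvKmerDict_mem_getD]
            exact ⟨h2', h3', hkm.symm⟩
          refine ⟨tps, rfl, List.ne_nil_of_mem htpm, x, ?_, x + d, htpm, by ring, rfl⟩
          rw [pvKmerDict_mem_getD]
          exact ⟨h0, h1, rfl⟩
  dsimp only at h1 h2
  refine ⟨fun d x => ?_, fun d => ?_, h3 (by rw [PySem.Dict.keys_empty]; exact List.nodup_nil)⟩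
  · have := h1 d x
    rw [PySem.Dict.getD_empty] at this
    unfold pvInvertedOffsets
    rw [this, hRC]
    simp
  · have := h2 d
    rw [PySem.Dict.keys_empty] at this
    unfold pvInvertedOffsets
    rw [this]
    simp only [List.not_mem_nil, false_or]
    constructor
    · rintro ⟨x, hx⟩; exact ⟨x, (hRC d x).1 hx⟩
    · rintro ⟨x, hx⟩; exact ⟨x, (hRC d x).2 hx⟩

lemma pv_forward_eq (N : List Char) (k : Int) (n : Int) :
    pvMaxSpanFromOffsets k (pvForwardOffsets (pvKmerDict N k n)) =
      (PySem.List.pyRange 1 (n - k + 1)).foldl (fun forward d =>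
        let span := pvBestSpan k (fun p => pvKmer N k p == pvKmer N k (p + d)) 0 (n - k - d)
        if span > forward then span else forward) 0 := by
  obtain ⟨hA1, hA2, hA3⟩ := pvForwardOffsets_spec N k n
  rw [pvMaxEqCore k (pvForwardOffsets (pvKmerDict N k n)) (PySem.List.pyRange 1 (n - k + 1))
    (fun _ => 0) (fun d => n - k - d) (fun d p => pvKmer N k p == pvKmer N k (p + d))
    ?h1 ?h2 hA3 ?h4]
  · apply PySem.List.foldl_congr_mem
    intro acc d _
    dsimp only
    split_ifs <;> omega
  case h1 =>
    intro d hd x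
    rw [PySem.List.mem_pyRange_one] at hd
    rw [hA1 d x, PySem.List.mem_pyRange_one]
    simp only [beq_iff_eq]
    constructor
    · rintro ⟨a, b, c, e⟩
      exact ⟨⟨a, by omega⟩, e⟩
    · rintro ⟨⟨a, b⟩, e⟩
      exact ⟨a, by omega, by omega, e⟩
  case h2 =>
    intro d
    rw [hA2 d]
    constructor
    · rintro ⟨x, hx⟩
      exact ⟨x, (hA1 d x).2 hx⟩
    · rintro ⟨x, hx⟩
      exact ⟨x, (hA1 d x).1 hx⟩
  case h4 =>
    intro d hd
    rcases (hA2 d).1 hd with ⟨x, h0, h1, h2, _⟩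
    rw [PySem.List.mem_pyRange_one]
    omega

lemma pv_inverted_eq (N rcN : List Char) (k : Int) (n : Int) :
    pvMaxSpanFromOffsets k (pvInvertedOffsets (pvKmerDict N k n) (pvKmerDict rcN k n)) =
      (PySem.List.pyRange (-(n - k)) (n - k + 1)).foldl (fun inverted delta =>
        let span := pvBestSpan k
          (fun p => decide (0 ≤ p + delta) && decide (p + delta ≤ n - k) &&
            (pvKmer N k p == pvKmer rcN k (p + delta))) 0 (n - k)
        if span > inverted then span else inverted) 0 := by
  obtain ⟨hA1, hA2, hA3⟩ := pvInvertedOffsets_spec N rcN k n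
  rw [pvMaxEqCore k (pvInvertedOffsets (pvKmerDict N k n) (pvKmerDict rcN k n))
    (PySem.List.pyRange (-(n - k)) (n - k + 1))
    (fun _ => 0) (fun _ => n - k)
    (fun delta p => decide (0 ≤ p + delta) && decide (p + delta ≤ n - k) &&
      (pvKmer N k p == pvKmer rcN k (p + delta)))
    ?h1 ?h2 hA3 ?h4]
  · apply PySem.List.foldl_congr_mem
    intro acc d _
    dsimp only
    split_ifs <;> omega
  case h1 =>
    intro d _ x
    rw [hA1 d x, PySem.List.mem_pyRange_one]
    simp only [Bool.and_eq_true, decide_eq_true_eq, beq_iff_eq]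
    constructor
    · rintro ⟨a, b, c, e, f⟩
      exact ⟨⟨a, b⟩, ⟨c, by omega⟩, f⟩
    · rintro ⟨⟨a, b⟩, ⟨c, e⟩, f⟩
      exact ⟨a, b, c, by omega, f⟩
  case h2 =>
    intro d
    rw [hA2 d]
    constructor
    · rintro ⟨x, hx⟩
      exact ⟨x, (hA1 d x).2 hx⟩
    · rintro ⟨x, hx⟩
      exact ⟨x, (hA1 d x).1 hx⟩
  case h4 =>
    intro d hd
    rcases (hA2 d).1 hd with ⟨x, h0, h1, h2, h3, _⟩
    rw [PySem.List.mem_pyRange_one]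
    omega

-- ===== VERDICT (by name: the statement is the Claim_ definition above) =====
theorem compute_self_dotplot_track_spans_spec : Claim_equal_compute_self_dotplot_track_spans := by
  intro sequence k _
  unfold Spec_compute_self_dotplot_track_spans
  unfold compute_self_dotplot_track_spans compute_self_dotplot_track_spans_alt
  by_cases hsmall : PySem.List.len (PySem.Chars.upper sequence.toList) < max 2 k
  · show (if PySem.List.len (PySem.Chars.upper sequence.toList) < max 2 k then _ else _)
        = (if PySem.List.len (PySem.Chars.upper sequence.toList) < max 2 k then _ else _)
    rw [if_pos hsmall, if_pos hsmall]
  · show (if PySem.List.len (PySem.Chars.upper sequence.toList) < max 2 k then _ else _)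
        = (if PySem.List.len (PySem.Chars.upper sequence.toList) < max 2 k then _ else _)
    rw [if_neg hsmall, if_neg hsmall]
    exact congrArg₂ List.cons
      (congrArg (Prod.mk _) (pv_forward_eq _ k _))
      (congrArg₂ List.cons
        (congrArg (Prod.mk _) (pv_inverted_eq _ _ k _)) rfl)
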